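-- pv_equiv track=rewrite | github.com/agnul/AdventOfCode | 2023/python/day_14.py | part_2
-- ===== SOURCE A (Python) =====
-- def transpose(grid):
--     return tuple(''.join(column) for column in zip(*grid))
--
-- def roll_left(rocks):
--     return ''.join(sorted(rocks, reverse=True))
--
-- def roll_right(rocks):
--     return ''.join(sorted(rocks))
--
-- def tilt_north(dish):
--     cols = transpose(dish)
--     tilted = tuple('#'.join([roll_left(span) for span in c.split('#')]) for c in cols)
--     return transpose(tilted)
--
-- def tilt_west(dish):
--     return tuple('#'.join([roll_left(span) for span in row.split('#')]) for row in dish)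
--
-- def tilt_south(dish):
--     cols = transpose(dish)
--     tilted = tuple('#'.join([roll_right(span) for span in c.split('#')]) for c in cols)
--     return transpose(tilted)
--
-- def tilt_east(dish):
--     return tuple('#'.join([roll_right(span) for span in row.split('#')]) for row in dish)
--
-- def spin(dish):
--     dish = tilt_north(dish)
--     dish = tilt_west(dish)
--     dish = tilt_south(dish)
--     dish = tilt_east(dish)
--     return dish
--
-- def part_2(dish):
--     seen = {dish}
--     steps = [dish]
--
--     iterations = 0
--     while True:
--         iterations += 1
--         dish = spin(dish)
--         if dish in seen:
--             break
--         seen.add(dish)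
--         steps.append(dish)
--
--     loop_start = steps.index(dish)
--     loop_size = iterations - loop_start
--     result = steps[loop_start + (1000000000 - loop_start) % loop_size]
--
--     return sum(line.count('O') * (len(result) - i) for i, line in enumerate(result))
-- ===== SOURCE B (Python) =====
-- # B: same spin-cycle task, different decomposition throughout:
-- # index-based column extraction (no zip), a single direction-parameterised tilt
-- # built from a one-pass segment scan (no split/join), a spin expressed as a fold
-- # over the four directions, dict-based cycle detection with re-simulation of the
-- # remainder (no trail list / list.index), and an accumulator loop for the load.
--
-- def _columns(grid):
--     if not grid:
--         return ()
--     m = min(len(r) for r in grid)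
--     return tuple(''.join(r[j] for r in grid) for j in range(m))
--
-- def _tilt_line(line, desc):
--     out = []
--     seg = []
--     for c in line:
--         if c == '#':
--             out.extend(sorted(seg, reverse=desc))
--             out.append('#')
--             seg = []
--         else:
--             seg.append(c)
--     out.extend(sorted(seg, reverse=desc))
--     return ''.join(out)
--
-- def _tilt(grid, desc, vertical):
--     if vertical:
--         return _columns(tuple(_tilt_line(c, desc) for c in _columns(grid)))
--     return tuple(_tilt_line(row, desc) for row in grid)
--
-- def _spin(grid):
--     for desc, vert in ((True, True), (True, False), (False, True), (False, False)):
--         grid = _tilt(grid, desc, vert)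
--     return grid
--
-- def _load(grid):
--     total = 0
--     weight = len(grid)
--     for line in grid:
--         total += line.count('O') * weight
--         weight -= 1
--     return total
--
-- def part_2(dish):
--     seen = {dish: 0}
--     count = 0
--     while True:
--         count += 1
--         dish = _spin(dish)
--         if dish in seen:
--             loop_start = seen[dish]
--             loop_size = count - loop_start
--             for _ in range((1000000000 - loop_start) % loop_size):
--                 dish = _spin(dish)
--             return _load(dish)
--         seen[dish] = count
-- ===== Notes on version B (the rewrite author's own statement) =====
-- stated objective: alternative
-- what changed: B re-decomposes the whole pipeline: columns are extracted by index over min row length instead of A's zip recursion, the four split/sort/join tilt functions become one direction-parameterised tilt built on a one-pass segment scan with an accumulator, spin is a fold over the four directions, cycle detection keeps a single dict state-to-first-seen-count (no trail list, no list.index) and re-simulates the (10^9 - loop_start) % loop_size remaining spins, and the load is an accumulator loop instead of an enumerate sum.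
import Mathlib
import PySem

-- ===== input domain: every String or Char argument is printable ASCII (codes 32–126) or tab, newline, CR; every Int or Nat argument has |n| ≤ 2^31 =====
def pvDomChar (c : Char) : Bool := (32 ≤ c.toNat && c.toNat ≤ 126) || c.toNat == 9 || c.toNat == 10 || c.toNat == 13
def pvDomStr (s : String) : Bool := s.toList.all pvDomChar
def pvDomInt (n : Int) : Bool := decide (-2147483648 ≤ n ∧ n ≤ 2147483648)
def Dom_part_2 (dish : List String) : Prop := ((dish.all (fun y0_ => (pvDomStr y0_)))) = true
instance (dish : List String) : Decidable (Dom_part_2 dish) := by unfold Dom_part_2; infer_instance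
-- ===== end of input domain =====

-- B re-decomposes the whole pipeline: index-based column extraction instead of zip-recursion, one
-- direction-parameterised tilt with a one-pass segment scan instead of four split/sort/join tilts,
-- spin as a fold over the four directions, dict-based cycle detection re-simulating the remainder
-- instead of a trail list with list.index, and an accumulator loop for the load.
-- objective: alternative (same asymptotic cost, different structure throughout).
-- Both loops carry a fuel counter (1000000) solely to make the recursion total; it is the same in
-- both ports and far exceeds the cycle-detection length of any tested input.

-- ===== PORT A =====
-- zip(*grid): columns until the shortest row runs out (fuel = length of the first row, enough since rows only shrink)
def pyZipGo (n : Nat) (rows : List (List Char)) : List (List Char) :=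
  match n with
  | 0 => []
  | n + 1 =>
    if rows.any (fun r => r.isEmpty) then []
    else rows.map (fun r => r.headD ' ') :: pyZipGo n (rows.map (fun r => r.tail))

def transpose (grid : List String) : List String :=
  match grid.map String.toList with
  | [] => []
  | r :: rs => (pyZipGo r.length (r :: rs)).map (fun col => String.ofList col)

def roll_left (rocks : List Char) : List Char :=
  PySem.List.sorted rocks (fun c => c) true

def roll_right (rocks : List Char) : List Char :=
  PySem.List.sorted rocks (fun c => c) false

def tilt_north (dish : List String) : List String :=
  let cols := transpose dish
  let tilted := cols.map (fun c =>
    String.ofList (PySem.Chars.join ['#'] ((PySem.Chars.splitOn c.toList ['#']).map roll_left)))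
  transpose tilted

def tilt_west (dish : List String) : List String :=
  dish.map (fun row =>
    String.ofList (PySem.Chars.join ['#'] ((PySem.Chars.splitOn row.toList ['#']).map roll_left)))

def tilt_south (dish : List String) : List String :=
  let cols := transpose dish
  let tilted := cols.map (fun c =>
    String.ofList (PySem.Chars.join ['#'] ((PySem.Chars.splitOn c.toList ['#']).map roll_right)))
  transpose tilted

def tilt_east (dish : List String) : List String :=
  dish.map (fun row =>
    String.ofList (PySem.Chars.join ['#'] ((PySem.Chars.splitOn row.toList ['#']).map roll_right)))

def spin (dish : List String) : List String :=
  tilt_east (tilt_south (tilt_west (tilt_north dish)))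

def loopA (fuel : Nat) (seen : PySem.Set (List String)) (steps : List (List String))
    (iterations : Int) (dish : List String) : Int :=
  match fuel with
  | 0 => 0  -- fuel exhausted (same guard and value as loopB)
  | fuel + 1 =>
    let iterations := iterations + 1
    let dish := spin dish
    if PySem.Set.contains seen dish then
      match PySem.List.index? steps dish with
      | none => 0  -- unreachable: the break condition guarantees dish ∈ steps
      | some ls =>
        let loop_start : Int := ls
        let loop_size := iterations - loop_start
        match PySem.List.pyGet? steps (loop_start + PySem.Int.mod (1000000000 - loop_start) loop_size) with
        | none => 0  -- unreachable: the index is always in range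
        | some result =>
          ((PySem.List.enumerate result 0).map
            (fun p => (PySem.Str.count p.2 "O" : Int) * ((result.length : Int) - p.1))).sum
    else
      loopA fuel (PySem.Set.add seen dish) (steps ++ [dish]) iterations dish

def part_2 (dish : List String) : Int :=
  loopA 1000000 (PySem.Set.ofList [dish]) [dish] 0 dish

-- ===== PORT B =====
-- min(len(r) for r in grid) columns, each read by index (r[j] with j < len(r), so getD is exact)
def colsB (grid : List String) : List String :=
  match grid with
  | [] => []
  | g :: gs =>
    let m := gs.foldl (fun acc r => min acc r.toList.length) g.toList.length
    (List.range m).map (fun j => String.ofList ((g :: gs).map (fun r => r.toList.getD j ' ')))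

-- one pass over the line: collect a '#'-free segment, flush it sorted at each '#' and at the end
def tiltLineB (desc : Bool) (line : List Char) : List Char :=
  let st := line.foldl (fun (st : List Char × List Char) c =>
    if c = '#' then (st.1 ++ PySem.List.sorted st.2 (fun x => x) desc ++ ['#'], [])
    else (st.1, st.2 ++ [c])) ([], [])
  st.1 ++ PySem.List.sorted st.2 (fun x => x) desc

def tiltB (grid : List String) (desc : Bool) (vertical : Bool) : List String :=
  if vertical then
    colsB ((colsB grid).map (fun c => String.ofList (tiltLineB desc c.toList)))
  else
    grid.map (fun row => String.ofList (tiltLineB desc row.toList))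

def spinB (grid : List String) : List String :=
  [(true, true), (true, false), (false, true), (false, false)].foldl
    (fun g p => tiltB g p.1 p.2) grid

def loadB (grid : List String) : Int :=
  (grid.foldl (fun (st : Int × Int) line =>
    (st.1 + (PySem.Str.count line "O" : Int) * st.2, st.2 - 1)) (0, (grid.length : Int))).1

def loopB (fuel : Nat) (seen : PySem.Dict (List String) Int) (count : Int)
    (dish : List String) : Int :=
  match fuel with
  | 0 => 0  -- fuel exhausted (same guard and value as loopA)
  | fuel + 1 =>
    let count := count + 1
    let dish := spinB dish
    match PySem.Dict.get? seen dish with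
    | some loop_start =>
      let loop_size := count - loop_start
      let remaining := PySem.Int.mod (1000000000 - loop_start) loop_size
      loadB ((PySem.List.pyRange 0 remaining 1).foldl (fun d _ => spinB d) dish)
    | none =>
      loopB fuel (PySem.Dict.insert seen dish count) count dish

def part_2_alt (dish : List String) : Int :=
  loopB 1000000 (PySem.Dict.ofList [(dish, 0)]) 0 dish

-- ===== PRECONDITION & SPEC =====
def Spec_part_2 (dish : List String) (out : Int) : Prop := out = part_2_alt dish
instance (dish : List String) (out : Int) : Decidable (Spec_part_2 dish out) := by unfold Spec_part_2; infer_instance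

-- ===== CLAIM (what is proved, stated in full; the proofs are below) =====
def Claim_equal_part_2 : Prop := ∀ (dish : List String), Dom_part_2 dish → Spec_part_2 dish (part_2 dish)

-- ===== LEMMAS AND PROOFS =====

-- ---- columns: B's index-based extraction equals A's zip recursion ----

lemma foldl_min_le_init (f : List Char → Nat) : ∀ (rows : List (List Char)) (a : Nat),
    rows.foldl (fun m r => min m (f r)) a ≤ a := by
  intro rows
  induction rows with
  | nil => intro a; simp
  | cons r rs ih =>
    intro a
    simp only [List.foldl_cons]
    exact le_trans (ih _) (min_le_left _ _)

lemma foldl_min_le_mem (f : List Char → Nat) : ∀ (rows : List (List Char)) (a : Nat) (r : List Char),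
    r ∈ rows → rows.foldl (fun m r => min m (f r)) a ≤ f r := by
  intro rows
  induction rows with
  | nil => intro a r h; simp at h
  | cons x xs ih =>
    intro a r h
    simp only [List.foldl_cons]
    rcases List.mem_cons.mp h with h | h
    · subst h; exact le_trans (foldl_min_le_init f xs _) (min_le_right _ _)
    · exact ih _ r h

lemma foldl_min_shift : ∀ (rows : List (List Char)) (a : Nat),
    (∀ r ∈ rows, 1 ≤ r.length) →
    rows.foldl (fun m r => min m r.length) (a + 1)
      = (rows.map (fun r => r.tail)).foldl (fun m r => min m r.length) a + 1 := by
  intro rows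
  induction rows with
  | nil => intro a _; simp
  | cons x xs ih =>
    intro a h
    have hx : 1 ≤ x.length := h x (by simp)
    simp only [List.foldl_cons, List.map_cons, List.length_tail]
    have : min (a + 1) x.length = min a (x.length - 1) + 1 := by omega
    rw [this, ih _ (fun r hr => h r (by simp [hr]))]

lemma zip_eq : ∀ (n : Nat) (rows : List (List Char)),
    pyZipGo n rows = (List.range (rows.foldl (fun m r => min m r.length) n)).map
      (fun j => rows.map (fun r => r.getD j ' ')) := by
  intro n
  induction n with
  | zero =>
    intro rows
    have : rows.foldl (fun m r => min m r.length) 0 = 0 :=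
      Nat.le_zero.mp (foldl_min_le_init List.length rows 0)
    simp [pyZipGo, this]
  | succ n ih =>
    intro rows
    rw [pyZipGo]
    by_cases he : rows.any (fun r => r.isEmpty)
    · obtain ⟨r, hr, hre⟩ := List.any_eq_true.mp he
      have : rows.foldl (fun m r => min m r.length) (n + 1) = 0 := by
        have h1 := foldl_min_le_mem List.length rows (n + 1) r hr
        rw [List.isEmpty_iff] at hre
        subst hre
        simpa using h1
      simp [he, this]
    · have hall : ∀ r ∈ rows, 1 ≤ r.length := by
        intro r hr
        by_contra hl
        exact he (List.any_eq_true.mpr ⟨r, hr, by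
          rw [List.isEmpty_iff, ← List.length_eq_zero_iff]; omega⟩)
      rw [if_neg (by simp [he]), foldl_min_shift rows n hall, List.range_succ_eq_map]
      simp only [List.map_cons, List.map_map]
      congr 1
      · apply List.map_congr_left
        intro r _
        cases r <;> simp
      · rw [ih]
        apply List.map_congr_left
        intro j _
        simp only [Function.comp]
        rw [List.map_map]
        apply List.map_congr_left
        intro r _
        cases r <;> simp

lemma foldl_min_map : ∀ (gs : List String) (a : Nat),
    (gs.map String.toList).foldl (fun m r => min m r.length) a
      = gs.foldl (fun acc r => min acc r.toList.length) a := by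
  intro gs
  induction gs with
  | nil => intro a; rfl
  | cons x xs ih => intro a; simp only [List.map_cons, List.foldl_cons]; exact ih _

lemma cols_eq (grid : List String) : colsB grid = transpose grid := by
  cases grid with
  | nil => rfl
  | cons g gs =>
    simp only [colsB, transpose, List.map_cons, zip_eq, List.foldl_cons, min_self,
      foldl_min_map, List.map_map]
    apply List.map_congr_left
    intro j _
    rfl

-- ---- tilt line: B's one-pass scan equals A's split / sort / join ----

def mySplit (pre : List Char) : List Char → List (List Char)
  | [] => [pre]
  | c :: t => if c = '#' then pre :: mySplit [] t else mySplit (pre ++ [c]) t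

lemma go_eq : ∀ (fuel : Nat) (l cur : List Char) (acc : List (List Char)), l.length < fuel →
    PySem.Chars.splitOn.go ['#'] fuel l cur acc = acc.reverse ++ mySplit cur.reverse l := by
  intro fuel
  induction fuel with
  | zero => intro l cur acc h; omega
  | succ fuel ih =>
    intro l cur acc h
    cases l with
    | nil => simp [PySem.Chars.splitOn.go, mySplit]
    | cons c rest =>
      rw [PySem.Chars.splitOn.go]
      by_cases hc : c = '#'
      · subst hc
        simp only [List.isPrefixOf, mySplit]
        simp [ih rest [] _ (by simpa using Nat.lt_of_succ_lt_succ h)]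
      · simp only [List.isPrefixOf]
        rw [if_neg (by simp [Ne.symm hc])]
        rw [ih rest (c :: cur) acc (by simpa using Nat.lt_of_succ_lt_succ h)]
        simp [mySplit, hc]

lemma splitOn_eq (l : List Char) : PySem.Chars.splitOn l ['#'] = mySplit [] l := by
  have := go_eq (l.length + 1) l [] [] (by omega)
  simpa [PySem.Chars.splitOn] using this

lemma mySplit_ne_nil (pre l) : mySplit pre l ≠ [] := by
  induction l generalizing pre with
  | nil => simp [mySplit]
  | cons c t ih => by_cases hc : c = '#' <;> simp [mySplit, hc, ih]

lemma scan_eq (desc : Bool) : ∀ (l out seg : List Char),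
    (l.foldl (fun (st : List Char × List Char) c =>
        if c = '#' then (st.1 ++ PySem.List.sorted st.2 (fun x => x) desc ++ ['#'], [])
        else (st.1, st.2 ++ [c])) (out, seg)).1
      ++ PySem.List.sorted (l.foldl (fun (st : List Char × List Char) c =>
        if c = '#' then (st.1 ++ PySem.List.sorted st.2 (fun x => x) desc ++ ['#'], [])
        else (st.1, st.2 ++ [c])) (out, seg)).2 (fun x => x) desc
    = out ++ PySem.Chars.join ['#'] ((mySplit seg l).map
        (fun s => PySem.List.sorted s (fun x => x) desc)) := by
  intro l
  induction l with
  | nil => intro out seg; simp [mySplit, PySem.Chars.join_singleton]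
  | cons c t ih =>
    intro out seg
    by_cases hc : c = '#'
    · subst hc
      simp only [List.foldl_cons, mySplit]
      rw [ih]
      obtain ⟨h, tl, hht⟩ : ∃ h tl, mySplit [] t = h :: tl := by
        cases hmt : mySplit ([] : List Char) t with
        | nil => exact absurd hmt (mySplit_ne_nil _ _)
        | cons h tl => exact ⟨h, tl, rfl⟩
      simp [hht, PySem.Chars.join_cons_cons]
    · simp only [List.foldl_cons, mySplit, hc, if_false]
      rw [ih]

lemma line_eq (desc : Bool) (l : List Char) :
    tiltLineB desc l = PySem.Chars.join ['#'] ((PySem.Chars.splitOn l ['#']).map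
      (fun s => PySem.List.sorted s (fun x => x) desc)) := by
  rw [splitOn_eq]
  simpa [tiltLineB] using scan_eq desc l [] []

-- ---- spin ----

lemma tiltB_vert_true (g : List String) : tiltB g true true = tilt_north g := by
  simp only [tiltB, if_true, tilt_north, cols_eq]
  congr 1
  apply List.map_congr_left
  intro c _
  rw [line_eq]
  rfl

lemma tiltB_horiz_true (g : List String) : tiltB g true false = tilt_west g := by
  simp only [tiltB, tilt_west, Bool.false_eq_true, if_false]
  apply List.map_congr_left
  intro row _
  rw [line_eq]
  rfl

lemma tiltB_vert_false (g : List String) : tiltB g false true = tilt_south g := by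
  simp only [tiltB, if_true, tilt_south, cols_eq]
  congr 1
  apply List.map_congr_left
  intro c _
  rw [line_eq]
  rfl

lemma tiltB_horiz_false (g : List String) : tiltB g false false = tilt_east g := by
  simp only [tiltB, tilt_east, Bool.false_eq_true, if_false]
  apply List.map_congr_left
  intro row _
  rw [line_eq]
  rfl

lemma spinB_eq (g : List String) : spinB g = spin g := by
  simp only [spinB, List.foldl_cons, List.foldl_nil, spin,
    tiltB_vert_true, tiltB_horiz_true, tiltB_vert_false, tiltB_horiz_false]

-- ---- load ----

lemma load_acc : ∀ (g : List String) (tot n s : Int),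
    (g.foldl (fun (st : Int × Int) line =>
      (st.1 + (PySem.Str.count line "O" : Int) * st.2, st.2 - 1)) (tot, n - s)).1
    = tot + ((PySem.List.enumerate g s).map
        (fun p => (PySem.Str.count p.2 "O" : Int) * (n - p.1))).sum := by
  intro g
  induction g with
  | nil => intro tot n s; simp [PySem.List.enumerate_nil]
  | cons line t ih =>
    intro tot n s
    simp only [List.foldl_cons, PySem.List.enumerate_cons, List.map_cons, List.sum_cons]
    have : n - s - 1 = n - (s + 1) := by ring
    rw [this, ih]
    ring

lemma load_eq (g : List String) :
    loadB g = ((PySem.List.enumerate g 0).map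
      (fun p => (PySem.Str.count p.2 "O" : Int) * ((g.length : Int) - p.1))).sum := by
  have := load_acc g 0 (g.length : Int) 0
  simpa [loadB] using this

-- ---- the two loops agree step for step ----

-- j further spins (proof-side helper)
def spinN : Nat → List String → List String
  | 0, d => d
  | n + 1, d => spinN n (spin d)

lemma spinN_succ' (n : Nat) (d : List String) : spinN (n + 1) d = spin (spinN n d) := by
  induction n generalizing d with
  | zero => rfl
  | succ n ih => simp only [spinN] at *; rw [ih]

lemma foldl_spin (l : List Int) (d : List String) :
    l.foldl (fun d _ => spin d) d = spinN l.length d := by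
  induction l generalizing d with
  | nil => rfl
  | cons x xs ih => simp only [List.foldl_cons, List.length_cons, spinN]; exact ih (spin d)

-- along a spin chain, the entry i + j is the j-th iterate of the entry i
lemma chain_spinN (steps : List (List String)) (h : steps.IsChain (fun a b => b = spin a))
    (i j : Nat) (hij : i + j < steps.length) :
    steps[i + j]'hij = spinN j (steps[i]'(by omega)) := by
  induction j with
  | zero => simp [spinN]
  | succ j ih =>
    have hlt : i + j + 1 < steps.length := by omega
    have hstep : steps[i + j + 1]'hlt = spin (steps[i + j]'(by omega)) :=
      List.IsChain.getElem h (i + j) hlt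
    have : steps[i + (j + 1)]'hij = steps[i + j + 1]'hlt := by
      congr 1
    rw [this, hstep, ih (by omega), ← spinN_succ']

-- A's seen-set is literally its trail list, B's dict maps each trail state to its (first) index,
-- and both counters equal trail length - 1
lemma loop_agree (fuel : Nat) :
    ∀ (steps : List (List String)) (dish : List String) (seenB : PySem.Dict (List String) Int),
    steps.Nodup →
    steps.getLast? = some dish →
    steps.IsChain (fun a b => b = spin a) →
    (∀ x, PySem.Dict.get? seenB x = (PySem.List.index? steps x).map (fun n => (n : Int))) →
    loopA fuel steps steps ((steps.length : Int) - 1) dish =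
      loopB fuel seenB ((steps.length : Int) - 1) dish := by
  induction fuel with
  | zero => intros; rfl
  | succ fuel ih =>
    intro steps dish seenB hnd hlast hchain hB
    simp only [loopA, loopB, spinB_eq]
    by_cases hm : spin dish ∈ steps
    · -- break: both post-process
      have hcont : PySem.Set.contains steps (spin dish) = true := by
        simp [PySem.Set.contains, hm]
      obtain ⟨ls, hls⟩ := Option.isSome_iff_exists.mp
        ((PySem.List.index?_isSome_iff steps (spin dish)).mpr hm)
      have hBs : PySem.Dict.get? seenB (spin dish) = some ((ls : Nat) : Int) := by
        rw [hB, hls]; rfl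
      rw [hcont, if_pos rfl, hls, hBs]
      obtain ⟨hk, hsk, -⟩ := PySem.List.getElem_of_index?_eq_some hls
      have hlen1 : (1 : Nat) ≤ steps.length := by
        cases steps with
        | nil => simp at hlast
        | cons a t => simp
      have hiter : ((steps.length : Int) - 1) + 1 = (steps.length : Int) := by omega
      rw [hiter]
      have hsz : (0 : Int) < (steps.length : Int) - (ls : Int) := by
        have : (ls : Int) < (steps.length : Int) := by exact_mod_cast hk
        omega
      set m := PySem.Int.mod (1000000000 - (ls : Int)) ((steps.length : Int) - (ls : Int)) with hm0
      have hm1 : 0 ≤ m := PySem.Int.mod_nonneg _ hsz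
      have hm2 : m < (steps.length : Int) - (ls : Int) := PySem.Int.mod_lt _ hsz
      have hidx0 : (0 : Int) ≤ (ls : Int) + m := by omega
      have hidx1 : (ls : Int) + m < (steps.length : Int) := by omega
      dsimp only
      rw [PySem.List.pyGet?_eq_some_getElem steps hidx0 hidx1]
      have htn : ((ls : Int) + m).toNat = ls + m.toNat := by omega
      have hlt : ls + m.toNat < steps.length := by omega
      have hget : steps[((ls : Int) + m).toNat]'(by omega) = steps[ls + m.toNat]'hlt := by
        congr 1
      have hpr : (PySem.List.pyRange 0 m 1).length = m.toNat := by
        simp [pysem]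
      rw [load_eq, hget, chain_spinN steps hchain ls m.toNat hlt, hsk, foldl_spin, hpr]
    · -- continue: both recurse with extended state
      have hcont : PySem.Set.contains steps (spin dish) = false := by
        simp [PySem.Set.contains, hm]
      have hBn : PySem.Dict.get? seenB (spin dish) = none := by
        rw [hB, (PySem.List.index?_eq_none_iff steps (spin dish)).mpr hm]; rfl
      rw [hcont, if_neg (by simp), hBn, PySem.Set.add_of_not_mem hm]
      have hiter : ((steps.length : Int) - 1) + 1 = ((steps ++ [spin dish]).length : Int) - 1 := by
        simp
      rw [hiter]
      apply ih
      · exact (List.nodup_append.mpr ⟨hnd, List.nodup_singleton _, by intro a ha b hb he; simp at hb; subst hb; exact hm (he ▸ ha)⟩)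
      · exact List.getLast?_concat
      · rw [List.isChain_append]
        refine ⟨hchain, by simp, ?_⟩
        intro x hx y hy
        simp at hy; subst hy
        rw [hlast] at hx; simp at hx; subst hx; rfl
      · intro x
        by_cases hx : x = spin dish
        · subst hx
          rw [PySem.Dict.get?_insert_self, PySem.List.index?_append_singleton_self steps _ hm]
          simp
        · rw [PySem.Dict.get?_insert_of_ne _ _ hx, hB x]
          by_cases hxs : x ∈ steps
          · rw [PySem.List.index?_append_of_mem _ hxs]
          · rw [(PySem.List.index?_eq_none_iff steps x).mpr hxs,
              (PySem.List.index?_eq_none_iff _ x).mpr (by simp [hxs, hx])]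

lemma init_dict (d x : List String) :
    PySem.Dict.get? (PySem.Dict.ofList [(d, (0 : Int))]) x =
      (PySem.List.index? [d] x).map (fun n => (n : Int)) := by
  by_cases hx : x = d
  · subst hx
    simp [PySem.Dict.ofList, PySem.Dict.get?, PySem.Dict.empty, PySem.Dict.update,
      PySem.Dict.insert, PySem.List.index?, List.idxOf?]
  · simp [PySem.Dict.ofList, PySem.Dict.get?, PySem.Dict.empty, PySem.Dict.update,
      PySem.Dict.insert, PySem.List.index?, List.idxOf?, Ne.symm hx]

-- ===== VERDICT (by name: the statement is the Claim_ definition above) =====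
theorem part_2_spec : Claim_equal_part_2 := by
  intro dish _
  show part_2 dish = part_2_alt dish
  unfold part_2 part_2_alt
  have h0 : PySem.Set.ofList [dish] = [dish] := rfl
  have h1 : (0 : Int) = (([dish].length : Int) - 1) := by simp
  rw [h0, h1]
  exact loop_agree 1000000 [dish] dish _ (by simp) (by simp) (by simp) (init_dict dish)
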